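-- pv_equiv track=rewrite | github.com/Tasnim-Uddin/2023-British-Olympiad | main.py | new_fib
-- ===== SOURCE A (Python) =====
-- def new_fib(fib, num):
--     for i in range(0, len(fib)-1):
--         if fib[i] > num:
--             new_fib = fib[:i]
--             new_fib.reverse()
--             skip = 2
--             del new_fib[skip - 1::skip]
--             greatest = new_fib[0]
--             return greatest
--             break
-- ===== SOURCE B (Python) =====
-- def new_fib(fib, num):
--     prev = None
--     for cur in fib[:-1]:
--         if cur > num:
--             return prev
--         prev = cur
--     return None
-- ===== Notes on version B (the rewrite author's own statement) =====
-- stated objective: simpler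
-- what changed: Replaced the index loop with its slice/reverse/del-every-second dance (whose sole effect is fetching the previous element) by a single pass over fib[:-1] carrying the previous element, returning it directly at the first value exceeding num.
import Mathlib
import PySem

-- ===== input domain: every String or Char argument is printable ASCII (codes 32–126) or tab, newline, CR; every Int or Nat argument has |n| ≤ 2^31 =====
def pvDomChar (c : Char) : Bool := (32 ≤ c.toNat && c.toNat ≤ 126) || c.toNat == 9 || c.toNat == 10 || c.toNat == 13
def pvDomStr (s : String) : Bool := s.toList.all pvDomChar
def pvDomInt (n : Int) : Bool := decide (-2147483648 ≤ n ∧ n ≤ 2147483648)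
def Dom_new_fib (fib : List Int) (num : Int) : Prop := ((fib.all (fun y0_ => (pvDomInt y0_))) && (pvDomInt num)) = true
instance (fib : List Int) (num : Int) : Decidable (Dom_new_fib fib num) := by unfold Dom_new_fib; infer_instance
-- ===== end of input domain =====

-- B replaces A's slice/reverse/delete-every-second machinery (whose only effect is
-- fetching the element before the first one exceeding num) by one plain pass that
-- carries the previous element; objective: simpler.

-- ===== PORT A =====
-- del new_fib[1::2] on the reversed prefix: keep elements at even positions
def delStep2 : List Int → List Int
  | [] => []
  | [x] => [x]
  | x :: _ :: rest => x :: delStep2 rest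

-- the 'for i in range(0, len(fib)-1)' loop body of A, over the remaining indices
def newFibLoopA (fib : List Int) (num : Int) : List Int → Option Int
  | [] => none
  | i :: rest =>
    match PySem.List.pyGet? fib i with
    | none => none
    | some v =>
      if v > num then
        PySem.List.pyGet? (delStep2 (PySem.List.slice fib none (some i)).reverse) 0
      else newFibLoopA fib num rest

def new_fib (fib : List Int) (num : Int) : Option Int :=
  newFibLoopA fib num (PySem.List.pyRange 0 ((fib.length : Int) - 1) 1)

-- ===== PORT B =====
-- 'for cur in fib[:-1]' carrying prev
def newFibLoopB (num : Int) (prev : Option Int) : List Int → Option Int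
  | [] => none
  | cur :: rest => if cur > num then prev else newFibLoopB num (some cur) rest

def new_fib_alt (fib : List Int) (num : Int) : Option Int :=
  newFibLoopB num none (PySem.List.slice fib none (some (-1)))

-- ===== PRECONDITION & SPEC =====
-- Pre_ excludes exactly the inputs where A raises IndexError: fib has ≥ 2 elements and its head already exceeds num.
def Pre_new_fib (fib : List Int) (num : Int) : Prop := 2 ≤ fib.length → fib.headI ≤ num
instance (fib : List Int) (num : Int) : Decidable (Pre_new_fib fib num) := by unfold Pre_new_fib; infer_instance
def pvWitness_new_fib : List Int × Int := ([1, 2, 3, 5, 8], 4)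

def Spec_new_fib (fib : List Int) (num : Int) (out : Option Int) : Prop := out = new_fib_alt fib num
instance (fib : List Int) (num : Int) (out : Option Int) : Decidable (Spec_new_fib fib num out) := by unfold Spec_new_fib; infer_instance

-- ===== CLAIM (what is proved, stated in full; the proofs are below) =====
def Claim_equal_new_fib : Prop := ∀ (fib : List Int) (num : Int), Dom_new_fib fib num → Pre_new_fib fib num → Spec_new_fib fib num (new_fib fib num)

-- ===== LEMMAS AND PROOFS =====

theorem delStep2_head (l : List Int) : (delStep2 l).head? = l.head? := by
  match l with
  | [] => rfl
  | [x] => rfl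
  | x :: y :: rest => rfl

theorem pyGet?_zero (l : List Int) : PySem.List.pyGet? l 0 = l.head? := by
  cases l <;> simp [PySem.List.pyGet?, PySem.List.pyIdx?]

-- On a hit at index j ≥ 1, A's slice/reverse/del machinery returns fib[j-1]
theorem hit_value (fib : List Int) (j : ℕ) (h1 : 1 ≤ j) (h2 : j ≤ fib.length) :
    PySem.List.pyGet? (delStep2 (PySem.List.slice fib none (some (j : Int))).reverse) 0
      = fib[j - 1]? := by
  rw [pyGet?_zero, delStep2_head, PySem.List.slice_to_natCast, List.head?_reverse]
  rw [List.getLast?_eq_getElem?]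
  simp only [List.length_take, Nat.min_eq_left h2]
  exact List.getElem?_take_of_lt (by omega)

-- main correspondence between A's remaining index loop and B's remaining pass
theorem loop_corr (fib : List Int) (num : Int) :
    ∀ (k j : ℕ), 1 ≤ j → j + k + 1 = fib.length →
      newFibLoopA fib num (PySem.List.pyRange (j : Int) ((fib.length : Int) - 1) 1)
        = newFibLoopB num fib[j - 1]? ((fib.drop j).take k) := by
  intro k
  induction k with
  | zero =>
    intro j hj hlen
    have hnil : PySem.List.pyRange (j : Int) ((fib.length : Int) - 1) 1 = [] :=
      PySem.List.pyRange_one_eq_nil (by omega)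
    rw [hnil]
    simp [newFibLoopA, newFibLoopB]
  | succ k ih =>
    intro j hj hlen
    have hjlt : j < fib.length := by omega
    have hcons : PySem.List.pyRange (j : Int) ((fib.length : Int) - 1) 1
        = (j : Int) :: PySem.List.pyRange ((j : Int) + 1) ((fib.length : Int) - 1) 1 :=
      PySem.List.pyRange_one_cons (by omega)
    have hget : PySem.List.pyGet? fib (j : Int) = some fib[j] := by
      rw [PySem.List.pyGet?_natCast fib j, List.getElem?_eq_getElem hjlt]
    have hdrop : fib.drop j = fib[j] :: fib.drop (j + 1) := (List.getElem_cons_drop hjlt).symm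
    rw [hcons, hdrop]
    simp only [newFibLoopA, hget, List.take_succ_cons, newFibLoopB]
    by_cases hv : fib[j] > num
    · simp only [if_pos hv]
      exact hit_value fib j hj (le_of_lt hjlt)
    · simp only [if_neg hv]
      have hcast : ((j : Int) + 1) = ((j + 1 : ℕ) : Int) := by push_cast; ring
      rw [hcast, ih (j + 1) (by omega) (by omega)]
      congr 1
      simp [List.getElem?_eq_getElem hjlt]

-- ===== VERDICT (by name: the statement is the Claim_ definition above) =====
theorem new_fib_spec : Claim_equal_new_fib := by
  unfold Claim_equal_new_fib
  intro fib num _ hpre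
  unfold Spec_new_fib new_fib new_fib_alt
  match fib with
  | [] => rfl
  | [a] => rfl
  | a :: b :: rest =>
    have ha : a ≤ num := hpre (by simp)
    have hnot : ¬ (a > num) := not_lt.mpr ha
    rw [PySem.List.slice_to_neg_one]
    have hcons : PySem.List.pyRange (0 : Int) (((a :: b :: rest).length : Int) - 1) 1
        = (0 : Int) :: PySem.List.pyRange ((0 : Int) + 1) (((a :: b :: rest).length : Int) - 1) 1 :=
      PySem.List.pyRange_one_cons (by simp)
    rw [hcons]
    have hget : PySem.List.pyGet? (a :: b :: rest) (0 : Int) = some a := by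
      rw [pyGet?_zero]; rfl
    simp only [newFibLoopA, hget, if_neg hnot]
    have hd : (a :: b :: rest).dropLast = a :: (b :: rest).dropLast := by
      simp [List.dropLast]
    rw [hd]
    simp only [newFibLoopB, if_neg hnot]
    have h1 : ((0 : Int) + 1) = ((1 : ℕ) : Int) := by norm_num
    rw [h1, loop_corr (a :: b :: rest) num rest.length 1 (by omega) (by simp; omega)]
    congr 1
    · simp [List.dropLast_eq_take]
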